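-- pv_equiv track=rewrite | github.com/szymongalecki/Advent-of-Code-2024 | Day7/1.py | calibrated
-- ===== SOURCE A (Python) =====
-- def calibrated(value: int, numbers: list[int], index: int, temp: int) -> bool:
--     if index == len(numbers):
--         if temp == value:
--             return True
--         else:
--             return False
--     return calibrated(value, numbers, index + 1, temp + numbers[index]) or calibrated(
--         value, numbers, index + 1, temp * numbers[index]
--     )
-- ===== SOURCE B (Python) =====
-- def calibrated(value: int, numbers: list[int], index: int, temp: int) -> bool:
--     reachable = {temp}
--     for n in numbers[index:]:
--         reachable = {t + n for t in reachable} | {t * n for t in reachable}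
--     return value in reachable
-- ===== Notes on version B (the rewrite author's own statement) =====
-- stated objective: alternative
-- what changed: Depth-first short-circuit recursion over (index,temp) is replaced by an iterative breadth-first frontier: a set of all reachable partial results is folded over the suffix numbers[index:], then membership of value is tested.
-- outside the precondition, e.g. on calibrated(5, [2, 3], -1, 0): A returns True, B returns False; on calibrated(5, [2, 3], 3, 0): A raises IndexError, B returns False
import Mathlib
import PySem

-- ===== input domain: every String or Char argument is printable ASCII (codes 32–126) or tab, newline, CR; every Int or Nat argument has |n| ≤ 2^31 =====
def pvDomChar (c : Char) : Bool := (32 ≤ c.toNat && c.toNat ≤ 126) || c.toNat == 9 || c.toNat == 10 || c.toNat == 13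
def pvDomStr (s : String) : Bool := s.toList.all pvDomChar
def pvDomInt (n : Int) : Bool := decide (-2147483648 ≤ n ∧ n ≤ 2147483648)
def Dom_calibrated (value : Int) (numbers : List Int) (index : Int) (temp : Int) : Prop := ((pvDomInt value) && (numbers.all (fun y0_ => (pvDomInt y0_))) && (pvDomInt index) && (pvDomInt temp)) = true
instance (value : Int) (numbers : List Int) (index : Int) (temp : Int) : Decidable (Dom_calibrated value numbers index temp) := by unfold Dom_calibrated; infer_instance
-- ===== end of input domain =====

-- B replaces A's depth-first short-circuit recursion by an iterative reachable-set fold over the suffix (alternative decomposition, same worst-case cost).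


-- ===== PORT A =====
-- recursion on a fuel that bounds the recursion depth (len(numbers) + 1 - index steps); inside Pre_ the fuel never runs out
def calibratedGo (value : Int) (numbers : List Int) : Nat → Int → Int → Bool
  | 0, _, _ => false
  | fuel + 1, index, temp =>
    if index = (numbers.length : Int) then
      if temp = value then true else false
    else
      match PySem.List.pyGet? numbers index with
      | none => false          -- IndexError in Python: outside Pre_
      | some n =>
        calibratedGo value numbers fuel (index + 1) (temp + n) ||
        calibratedGo value numbers fuel (index + 1) (temp * n)

def calibrated (value : Int) (numbers : List Int) (index : Int) (temp : Int) : Bool :=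
  calibratedGo value numbers ((numbers.length : Int) + 1 - index).toNat index temp

-- ===== PORT B =====
def calibrated_alt (value : Int) (numbers : List Int) (index : Int) (temp : Int) : Bool :=
  let reachable :=
    (PySem.List.slice numbers (some index) none).foldl
      (fun r n =>
        PySem.Set.union (PySem.Set.ofList (r.map (· + n))) (PySem.Set.ofList (r.map (· * n))))
      (PySem.Set.ofList [temp])
  PySem.Set.contains reachable value

-- ===== PRECONDITION & SPEC =====
-- Pre_ excludes index > len(numbers) and index < -len(numbers), where A raises IndexError, and
-- negative in-range index, a recursion-parameter corner no caller uses, where A's and B's readings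
-- are both defensible (A wraps numbers[index] once and then restarts from position 0; B takes the suffix numbers[index:]).
def Pre_calibrated (value : Int) (numbers : List Int) (index : Int) (temp : Int) : Prop :=
  0 ≤ index ∧ index ≤ (numbers.length : Int)
instance (value : Int) (numbers : List Int) (index : Int) (temp : Int) : Decidable (Pre_calibrated value numbers index temp) := by unfold Pre_calibrated; infer_instance
def pvWitness_calibrated : Int × List Int × Int × Int := (5, [2, 3], 0, 0)

def Spec_calibrated (value : Int) (numbers : List Int) (index : Int) (temp : Int) (out : Bool) : Prop := out = calibrated_alt value numbers index temp
instance (value : Int) (numbers : List Int) (index : Int) (temp : Int) (out : Bool) : Decidable (Spec_calibrated value numbers index temp out) := by unfold Spec_calibrated; infer_instance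

-- ===== CLAIM (what is proved, stated in full; the proofs are below) =====
def Claim_equal_calibrated : Prop := ∀ (value : Int) (numbers : List Int) (index : Int) (temp : Int), Dom_calibrated value numbers index temp → Pre_calibrated value numbers index temp → Spec_calibrated value numbers index temp (calibrated value numbers index temp)

-- ===== LEMMAS AND PROOFS =====

-- the mathematical content shared by both sides: "value is reachable from temp over the suffix l"
def specR (value : Int) : List Int → Int → Bool
  | [], t => decide (t = value)
  | n :: l, t => specR value l (t + n) || specR value l (t * n)

-- A's recursion computes specR on the suffix (given enough fuel and an in-range index)
theorem goEq (value : Int) (numbers : List Int) (fuel : Nat) :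
    ∀ (i : Nat) (temp : Int), i ≤ numbers.length → numbers.length - i < fuel →
      calibratedGo value numbers fuel (i : Int) temp = specR value (numbers.drop i) temp := by
  induction fuel with
  | zero => intro i temp _ h; omega
  | succ fuel ih =>
    intro i temp hle hf
    by_cases hi : i = numbers.length
    · subst hi
      simp [calibratedGo, specR, List.drop_length]
    · have hlt : i < numbers.length := by omega
      have hix : ((i : Int)) ≠ (numbers.length : Int) := by exact_mod_cast hi
      have hget : PySem.List.pyGet? numbers (i : Int) = some numbers[i] := by
        simp [PySem.List.pyGet?_natCast, List.getElem?_eq_getElem hlt]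
      have hdrop : numbers.drop i = numbers[i] :: numbers.drop (i + 1) :=
        List.drop_eq_getElem_cons hlt
      have h1 := ih (i + 1) (temp + numbers[i]) (by omega) (by omega)
      have h2 := ih (i + 1) (temp * numbers[i]) (by omega) (by omega)
      push_cast at h1 h2
      simp only [calibratedGo, if_neg hix, hget, hdrop, specR]
      rw [h1, h2]

-- B's frontier fold: value is in the folded set iff specR holds from some seed in the set
theorem foldMem (value : Int) (l : List Int) :
    ∀ (s : PySem.Set Int),
      (value ∈ l.foldl
        (fun r n =>
          PySem.Set.union (PySem.Set.ofList (r.map (· + n))) (PySem.Set.ofList (r.map (· * n)))) s)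
      ↔ ∃ t ∈ s, specR value l t = true := by
  induction l with
  | nil =>
    intro s
    simp [specR, eq_comm]
  | cons n l ih =>
    intro s
    rw [List.foldl_cons, ih]
    constructor
    · rintro ⟨t', ht', hs⟩
      rw [PySem.Set.mem_union] at ht'
      rcases ht' with h | h <;> rw [PySem.Set.mem_ofList, List.mem_map] at h <;>
        rcases h with ⟨t, ht, rfl⟩
      · exact ⟨t, ht, by simp [specR, hs]⟩
      · exact ⟨t, ht, by simp [specR, hs]⟩
    · rintro ⟨t, ht, hs⟩
      simp only [specR, Bool.or_eq_true] at hs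
      rcases hs with hs | hs
      · exact ⟨t + n, by rw [PySem.Set.mem_union, PySem.Set.mem_ofList]; exact Or.inl (List.mem_map.2 ⟨t, ht, rfl⟩), hs⟩
      · exact ⟨t * n, by rw [PySem.Set.mem_union]; exact Or.inr (by rw [PySem.Set.mem_ofList]; exact List.mem_map.2 ⟨t, ht, rfl⟩), hs⟩

-- ===== VERDICT (by name: the statement is the Claim_ definition above) =====
theorem calibrated_spec : Claim_equal_calibrated := by
  intro value numbers index temp _ hpre
  obtain ⟨h0, hle⟩ := hpre
  obtain ⟨i, rfl⟩ : ∃ i : Nat, index = (i : Int) := ⟨index.toNat, (Int.toNat_of_nonneg h0).symm⟩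
  have hiN : i ≤ numbers.length := by exact_mod_cast hle
  show calibrated value numbers (i : Int) temp = calibrated_alt value numbers (i : Int) temp
  have hfuel : ((numbers.length : Int) + 1 - (i : Int)).toNat = numbers.length + 1 - i := by omega
  have hA : calibrated value numbers (i : Int) temp = specR value (numbers.drop i) temp := by
    unfold calibrated
    rw [hfuel]
    exact goEq value numbers (numbers.length + 1 - i) i temp hiN (by omega)
  have hB : (calibrated_alt value numbers (i : Int) temp = true)
      ↔ specR value (numbers.drop i) temp = true := by
    unfold calibrated_alt
    rw [PySem.List.slice_from_natCast, PySem.Set.contains_iff, foldMem]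
    constructor
    · rintro ⟨t, ht, hs⟩
      have : t = temp := by simpa [PySem.Set.mem_ofList] using ht
      exact this ▸ hs
    · intro hs
      exact ⟨temp, by simp [PySem.Set.mem_ofList], hs⟩
  rw [← Bool.eq_iff_iff] at hB
  rw [hA, ← hB]
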